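-- pv_equiv track=rewrite | github.com/RaimundoGross/Pila-de-Textos | verifvalid.py | calc_largo
-- ===== SOURCE A (Python) =====
-- allowed_symbols="abcdefghijklmnopqrstuvwxyzABCDEFGHIJKLMNOPQRSTUVWXYZ1234567890!\"#$%&/()=?¡¿}{[]+*'-_.:,;^~ \t\n"
--
-- def calc_largo(texto):
--     total = 0
--     for c in texto:
--         if c in allowed_symbols:
--             total += 1
--         else:
--             return -1
--     return total
-- ===== SOURCE B (Python) =====
-- allowed_symbols="abcdefghijklmnopqrstuvwxyzABCDEFGHIJKLMNOPQRSTUVWXYZ1234567890!\"#$%&/()=?\u00a1\u00bf}{[]+*'-_.:,;^~ \t\n"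
--
-- _allowed_set = set(allowed_symbols)
--
-- def calc_largo(texto):
--     if set(texto) <= _allowed_set:
--         return len(texto)
--     return -1
-- ===== Notes on version B (the rewrite author's own statement) =====
-- stated objective: idiomatic
-- what changed: Replaced A's accumulating per-character loop with early return by a one-shot set-subset test (set(texto) <= allowed set) plus a closed-form len(texto), maintaining no running counter or per-character branch.
import Mathlib
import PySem

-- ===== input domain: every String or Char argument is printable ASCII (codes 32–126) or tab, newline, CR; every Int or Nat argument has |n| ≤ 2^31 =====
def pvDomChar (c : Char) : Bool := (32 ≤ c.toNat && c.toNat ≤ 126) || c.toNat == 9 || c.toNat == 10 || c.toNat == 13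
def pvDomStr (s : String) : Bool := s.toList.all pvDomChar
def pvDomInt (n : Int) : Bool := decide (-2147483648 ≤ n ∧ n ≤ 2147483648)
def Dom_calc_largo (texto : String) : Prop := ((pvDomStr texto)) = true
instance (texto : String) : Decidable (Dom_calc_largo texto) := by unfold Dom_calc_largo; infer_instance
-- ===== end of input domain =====

-- B replaces A's accumulating per-character loop by a one-shot subset test (set(texto) <= allowed set) plus len(texto); objective: idiomatic.

-- ===== PORT A =====
def pvAllowed : List Char := "abcdefghijklmnopqrstuvwxyzABCDEFGHIJKLMNOPQRSTUVWXYZ1234567890!\"#$%&/()=?¡¿}{[]+*'-_.:,;^~ \t\n".toList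

def pvCalcLoop : List Char → Int → Int
  | [], total => total
  | c :: rest, total => if pvAllowed.contains c then pvCalcLoop rest (total + 1) else -1

def calc_largo (texto : String) : Int := pvCalcLoop texto.toList 0

-- ===== PORT B =====
def pvAllowedB : List Char := "abcdefghijklmnopqrstuvwxyzABCDEFGHIJKLMNOPQRSTUVWXYZ1234567890!\"#$%&/()=?¡¿}{[]+*'-_.:,;^~ \t\n".toList

def pvAllowedSet : PySem.Set Char := PySem.Set.ofList pvAllowedB

def calc_largo_alt (texto : String) : Int :=
  if PySem.Set.issubset (PySem.Set.ofList texto.toList) pvAllowedSet then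
    (texto.toList.length : Int)
  else
    -1

-- ===== PRECONDITION & SPEC =====
def Spec_calc_largo (texto : String) (out : Int) : Prop := out = calc_largo_alt texto
instance (texto : String) (out : Int) : Decidable (Spec_calc_largo texto out) := by unfold Spec_calc_largo; infer_instance

-- ===== CLAIM (what is proved, stated in full; the proofs are below) =====
def Claim_equal_calc_largo : Prop := ∀ (texto : String), Dom_calc_largo texto → Spec_calc_largo texto (calc_largo texto)

-- ===== LEMMAS AND PROOFS =====
theorem pvCalcLoop_char (l : List Char) (total : Int) :
    pvCalcLoop l total = if l.all pvAllowed.contains then total + l.length else -1 := by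
  induction l generalizing total with
  | nil => simp [pvCalcLoop]
  | cons c rest ih =>
    simp only [pvCalcLoop, List.all_cons, List.length_cons]
    by_cases h : pvAllowed.contains c = true
    · rw [if_pos h, ih]
      simp only [h, Bool.true_and]
      split_ifs <;> [push_cast; rfl] <;> ring
    · rw [Bool.not_eq_true] at h
      simp only [h, Bool.false_and, if_neg Bool.false_ne_true, Bool.false_eq_true, if_false]

theorem pv_subset_eq_all (l : List Char) :
    PySem.Set.issubset (PySem.Set.ofList l) pvAllowedSet = l.all pvAllowed.contains := by
  rcases h : PySem.Set.issubset (PySem.Set.ofList l) pvAllowedSet with _ | _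
  · symm
    rw [Bool.eq_false_iff]
    intro hall
    rw [Bool.eq_false_iff] at h
    apply h
    rw [PySem.Set.issubset_iff]
    intro x hx
    rw [PySem.Set.mem_ofList] at hx
    have := List.all_eq_true.mp hall x hx
    unfold pvAllowedSet
    rw [PySem.Set.mem_ofList]
    show x ∈ pvAllowed
    exact List.contains_iff_mem.mp this
  · symm
    rw [PySem.Set.issubset_iff] at h
    rw [List.all_eq_true]
    intro x hx
    have := h x ((PySem.Set.mem_ofList _ _).mpr hx)
    unfold pvAllowedSet at this
    rw [PySem.Set.mem_ofList] at this
    have hmem : x ∈ pvAllowed := this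
    exact List.contains_iff_mem.mpr hmem

-- ===== VERDICT (by name: the statement is the Claim_ definition above) =====
theorem calc_largo_spec : Claim_equal_calc_largo := by
  intro texto _
  unfold Spec_calc_largo calc_largo calc_largo_alt
  rw [pvCalcLoop_char, pv_subset_eq_all]
  split_ifs <;> simp
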